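-- pv_equiv track=rewrite | github.com/Haidram/codeforces_prblm_solutions | prblm D.py | func
-- ===== SOURCE A (Python) =====
-- def func(a,arr):
--     n = a[0]
--     l = a[1]
--     r = a[2]
--     count = 0
--
--     # For storing color c[i] at ith position defining array for both left and right
--     l_arr = [0]*(n+1)
--     r_arr = [0]*(n+1)
--
--     # For feeding color in left and right array
--     for i in range(n):
--         if i<l:
--             l_arr[arr[i]] += 1
--         else:
--             r_arr[arr[i]] += 1
--
--     # Cancelling all the socks which don't require any cost to get matching pair
--     for i in range(n+1):
--         min_num = min(l_arr[i], r_arr[i])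
--         l_arr[i] -= min_num
--         r_arr[i] -= min_num
--
--     # Now counting number of right and left socks in the array
--     l_pair = r_pair = 0
--     for i in range(n+1):
--         if l_arr[i] > 0:
--             l_pair += l_arr[i]
--         if r_arr[i] > 0:
--             r_pair += r_arr[i]
--
--     # Counting socks of more than 1 color
--     if l_pair > r_pair:
--         count = abs(l_pair - r_pair) + r_pair
--         transfer = (l_pair - r_pair)//2
--         for i in range(n+1):
--             while l_arr[i] > 1 and transfer > 0:
--                 l_arr[i] -= 2
--                 transfer -= 1
--                 count -= 1
--     elif r_pair > l_pair:
--         count = abs(l_pair - r_pair) + l_pair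
--         transfer = (r_pair - l_pair)//2
--         for i in range(n+1):
--             while r_arr[i] > 1 and transfer > 0:
--                 r_arr[i] -= 2
--                 transfer -= 1
--                 count -= 1
--     else:
--         count = l_pair
--
--     return count
-- ===== SOURCE B (Python) =====
-- def func(a, arr):
--     n, l = a[0], a[1]
--     # single signed counter: +1 for a left sock, -1 for a right sock of that color
--     delta = {}
--     for i in range(n):
--         delta[arr[i]] = delta.get(arr[i], 0) + (1 if i < l else -1)
--     vals = list(delta.values())
--     lp = sum(v for v in vals if v > 0)
--     rp = -sum(v for v in vals if v < 0)
--     odd = sum(1 for v in vals if v % 2 != 0 and (v > 0) == (rp <= lp))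
--     return max((lp + rp + 1) // 2, (max(lp, rp) + odd) // 2)
-- ===== Notes on version B (the rewrite author's own statement) =====
-- stated objective: alternative
-- what changed: Replaces A's two per-color count arrays with cancellation, residual-sum and budgeted pair-draining loops by a single SIGNED counter (delta[c] = #left - #right of color c) and a parity closed form: the answer is max(ceil((lp+rp)/2), (max(lp,rp)+odd)/2) where odd is the number of odd deltas on the larger side, so no cancellation pass, no min-cap and no drain loop exist at all.
-- outside the precondition, e.g. on func([2, 1, 1], [2, -1]): A returns 0, B returns 1
import Mathlib
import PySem

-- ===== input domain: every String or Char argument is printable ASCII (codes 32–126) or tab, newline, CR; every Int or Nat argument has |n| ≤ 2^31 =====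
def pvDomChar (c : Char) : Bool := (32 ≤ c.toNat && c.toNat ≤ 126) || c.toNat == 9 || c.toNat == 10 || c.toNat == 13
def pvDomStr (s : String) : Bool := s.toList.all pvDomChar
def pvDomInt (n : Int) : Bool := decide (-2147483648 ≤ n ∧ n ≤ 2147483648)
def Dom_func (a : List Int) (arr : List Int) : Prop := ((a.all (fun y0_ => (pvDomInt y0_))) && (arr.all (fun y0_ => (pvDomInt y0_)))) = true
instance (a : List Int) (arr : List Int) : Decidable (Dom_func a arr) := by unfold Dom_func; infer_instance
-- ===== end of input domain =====

-- B replaces A's two count arrays + cancellation + residual-sum + budgeted drain loops by ONE signed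
-- per-color counter (left minus right) and a parity closed form max(ceil((lp+rp)/2), (max+odd)/2); objective: alternative.


-- ===== PORT A =====
-- A's inner 'while l_arr[i] > 1 and transfer > 0:' loop; structural fuel c.toNat suffices
-- because each iteration lowers c by 2 and the guard needs 1 < c.
def pvDrainF : Nat → Int → Int → Int → Int × Int × Int
  | 0, c, t, cnt => (c, t, cnt)
  | f + 1, c, t, cnt =>
    if 1 < c ∧ 0 < t then pvDrainF f (c - 2) (t - 1) (cnt - 1) else (c, t, cnt)

def pvDrain (c t cnt : Int) : Int × Int × Int := pvDrainF c.toNat c t cnt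

-- the body of A's first for-loop (feed colours into l_arr / r_arr)
def pvStepA (arr : List Int) (l : Int) (p : List Int × List Int) (i : Int) : List Int × List Int :=
  if i < l then
    (PySem.List.pySetD p.1 (PySem.List.pyGetD arr i 0)
      (PySem.List.pyGetD p.1 (PySem.List.pyGetD arr i 0) 0 + 1), p.2)
  else
    (p.1, PySem.List.pySetD p.2 (PySem.List.pyGetD arr i 0)
      (PySem.List.pyGetD p.2 (PySem.List.pyGetD arr i 0) 0 + 1))

-- the body of A's cancellation loop
def pvStepC (p : List Int × List Int) (i : Int) : List Int × List Int :=
  let m := min (PySem.List.pyGetD p.1 i 0) (PySem.List.pyGetD p.2 i 0)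
  (PySem.List.pySetD p.1 i (PySem.List.pyGetD p.1 i 0 - m),
   PySem.List.pySetD p.2 i (PySem.List.pyGetD p.2 i 0 - m))

-- the body of A's counting loop
def pvStepP (Q1 Q2 : List Int) (s : Int × Int) (i : Int) : Int × Int :=
  (if 0 < PySem.List.pyGetD Q1 i 0 then s.1 + PySem.List.pyGetD Q1 i 0 else s.1,
   if 0 < PySem.List.pyGetD Q2 i 0 then s.2 + PySem.List.pyGetD Q2 i 0 else s.2)

-- the body of A's draining loop (state: the array, transfer, count)
def pvStepD (s : List Int × Int × Int) (i : Int) : List Int × Int × Int :=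
  let d := pvDrain (PySem.List.pyGetD s.1 i 0) s.2.1 s.2.2
  (PySem.List.pySetD s.1 i d.1, d.2.1, d.2.2)

def func (a : List Int) (arr : List Int) : Int :=
  let n := PySem.List.pyGetD a 0 0
  let l := PySem.List.pyGetD a 1 0
  let _r := PySem.List.pyGetD a 2 0
  let lr0 := (PySem.List.pyRange 0 n 1).foldl (pvStepA arr l)
    (List.replicate (n + 1).toNat 0, List.replicate (n + 1).toNat 0)
  let lr1 := (PySem.List.pyRange 0 (n + 1) 1).foldl pvStepC lr0
  let pairs := (PySem.List.pyRange 0 (n + 1) 1).foldl (pvStepP lr1.1 lr1.2) (0, 0)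
  let lp := pairs.1
  let rp := pairs.2
  if rp < lp then
    let st := (PySem.List.pyRange 0 (n + 1) 1).foldl pvStepD
      (lr1.1, PySem.Int.floordiv (lp - rp) 2, |lp - rp| + rp)
    st.2.2
  else if lp < rp then
    let st := (PySem.List.pyRange 0 (n + 1) 1).foldl pvStepD
      (lr1.2, PySem.Int.floordiv (rp - lp) 2, |lp - rp| + lp)
    st.2.2
  else lp

-- ===== PORT B =====
-- the body of B's single loop: delta[arr[i]] += 1 if i < l else -1
def pvStepDelta (arr : List Int) (l : Int) (d : PySem.Dict Int Int) (i : Int) : PySem.Dict Int Int :=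
  d.insert (PySem.List.pyGetD arr i 0)
    (d.getD (PySem.List.pyGetD arr i 0) 0 + (if i < l then 1 else -1))

def func_alt (a : List Int) (arr : List Int) : Int :=
  let n := PySem.List.pyGetD a 0 0
  let l := PySem.List.pyGetD a 1 0
  let delta := (PySem.List.pyRange 0 n 1).foldl (pvStepDelta arr l) PySem.Dict.empty
  let vals := delta.values
  let lp := (vals.filter (fun v => decide (0 < v))).sum
  let rp := -((vals.filter (fun v => decide (v < 0))).sum)
  let odd := ((vals.filter (fun v =>
      (PySem.Int.mod v 2 != 0) && (decide (0 < v) == decide (rp ≤ lp)))).length : Int)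
  max (PySem.Int.floordiv (lp + rp + 1) 2) (PySem.Int.floordiv (max lp rp + odd) 2)

-- ===== PRECONDITION & SPEC =====
-- Pre_ excludes exactly the inputs where A raises IndexError (len(a) < 3, n > len(arr), a colour
-- outside [-(n+1), n]) and the inputs holding a negative colour, where A's negative-index
-- wraparound silently conflates colour c with colour c + n + 1 while B keys its counter by c.
def Pre_func (a : List Int) (arr : List Int) : Prop :=
  3 ≤ a.length ∧ PySem.List.pyGetD a 0 0 ≤ (arr.length : Int) ∧
    ∀ x ∈ arr.take (PySem.List.pyGetD a 0 0).toNat, 0 ≤ x ∧ x ≤ PySem.List.pyGetD a 0 0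
instance (a : List Int) (arr : List Int) : Decidable (Pre_func a arr) := by
  unfold Pre_func; infer_instance
def pvWitness_func : List Int × List Int := ([2, 1, 1], [0, 2])

def Spec_func (a : List Int) (arr : List Int) (out : Int) : Prop := out = func_alt a arr
instance (a : List Int) (arr : List Int) (out : Int) : Decidable (Spec_func a arr out) := by
  unfold Spec_func; infer_instance

-- ===== CLAIM (what is proved, stated in full; the proofs are below) =====
def Claim_equal_func : Prop :=
  ∀ (a : List Int) (arr : List Int), Dom_func a arr → Pre_func a arr → Spec_func a arr (func a arr)

-- ===== LEMMAS AND PROOFS =====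

theorem pvDrainF_spec (f : Nat) (c t cnt : Int) (hc : 0 ≤ c) (ht : 0 ≤ t) (hf : c.toNat ≤ f) :
    pvDrainF f c t cnt =
      (c - 2 * min t (c / 2), t - min t (c / 2), cnt - min t (c / 2)) := by
  induction f generalizing c t cnt with
  | zero => simp [pvDrainF, Prod.ext_iff]; omega
  | succ f ih =>
    simp only [pvDrainF]
    split_ifs with h
    · rw [ih (c - 2) (t - 1) (cnt - 1) (by omega) (by omega) (by omega)]
      simp [Prod.ext_iff]; omega
    · simp [Prod.ext_iff]; omega

theorem pvDrain_spec (c t cnt : Int) (hc : 0 ≤ c) (ht : 0 ≤ t) :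
    pvDrain c t cnt = (c - 2 * min t (c / 2), t - min t (c / 2), cnt - min t (c / 2)) :=
  pvDrainF_spec _ c t cnt hc ht le_rfl

-- getD/set helpers
theorem pvGetD_set (xs : List Int) (m j : Nat) (v : Int) :
    (xs.set m v).getD j 0 = if m = j ∧ j < xs.length then v else xs.getD j 0 := by
  simp [List.getD_eq_getElem?_getD, List.getElem?_set]
  split_ifs <;> simp_all

def pvFoldA (arr : List Int) (N : Nat) (l : Int) (k : Nat) : List Int × List Int :=
  (PySem.List.pyRange 0 (k : Int) 1).foldl (pvStepA arr l)
    (List.replicate (N + 1) 0, List.replicate (N + 1) 0)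

theorem pvFoldA_spec (arr : List Int) (N : Nat) (l : Int)
    (hlen : N ≤ arr.length)
    (hpre : ∀ x ∈ arr.take N, 0 ≤ x ∧ x ≤ (N : Int)) :
    ∀ k : Nat, k ≤ N →
      (pvFoldA arr N l k).1.length = N + 1 ∧ (pvFoldA arr N l k).2.length = N + 1 ∧
      (∀ j : Nat, j ≤ N →
        (pvFoldA arr N l k).1.getD j 0 = ((arr.take (min k l.toNat)).count (j : Int) : Int)) ∧
      (∀ j : Nat, j ≤ N →
        (pvFoldA arr N l k).2.getD j 0 = (((arr.take k).drop l.toNat).count (j : Int) : Int)) := by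
  intro k
  induction k with
  | zero =>
    intro _
    simp [pvFoldA, PySem.List.pyRange_one_eq_nil (le_refl (0:Int))]
  | succ k ih =>
    intro hk
    obtain ⟨h1, h2, h3, h4⟩ := ih (by omega)
    have hkc : ((k + 1 : Nat) : Int) = (k : Int) + 1 := by push_cast; ring
    have hfold : pvFoldA arr N l (k + 1) = pvStepA arr l (pvFoldA arr N l k) (k : Int) := by
      rw [pvFoldA, hkc, PySem.List.pyRange_one_succ_right (by positivity), List.foldl_append]
      rfl
    have hklen : k < arr.length := by omega
    have hgetk : PySem.List.pyGetD arr (k : Int) 0 = arr[k] := by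
      rw [PySem.List.pyGetD_natCast, List.getD_eq_getElem?_getD, List.getElem?_eq_getElem hklen]
      rfl
    have hmem : arr[k] ∈ arr.take N := by
      have hkN : k < (arr.take N).length := by simp [List.length_take]; omega
      have hx := List.getElem_mem hkN
      rwa [List.getElem_take] at hx
    obtain ⟨hc0, hcN⟩ := hpre _ hmem
    have htake : arr.take (k + 1) = arr.take k ++ [arr[k]] := List.take_succ_eq_append_getElem hklen
    by_cases hbl : (k : Int) < l
    · -- left branch
      have hkl : k < l.toNat := by omega
      have hstep : pvFoldA arr N l (k + 1) =
          ((pvFoldA arr N l k).1.set (arr[k]).toNat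
            ((pvFoldA arr N l k).1.getD (arr[k]).toNat 0 + 1), (pvFoldA arr N l k).2) := by
        rw [hfold, pvStepA, if_pos hbl, hgetk, PySem.List.pySetD_of_nonneg _ _ hc0,
          PySem.List.pyGetD_of_nonneg _ _ hc0]
      refine ⟨by simp [hstep, h1], by simp [hstep, h2], ?_, ?_⟩
      · intro j hj
        rw [hstep]
        simp only
        rw [pvGetD_set, h1]
        have hminq : min (k+1) l.toNat = k + 1 := by omega
        have hmink : min k l.toNat = k := by omega
        rw [hminq, htake, List.count_append]
        by_cases he : (arr[k]).toNat = j
        · have hae : arr[k] = (j : Int) := by omega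
          rw [if_pos ⟨he, by omega⟩, he, h3 j hj, hmink, hae]
          simp
        · have hae : ¬ (arr[k] = (j : Int)) := by omega
          rw [if_neg (by tauto), h3 j hj, hmink]
          simp [hae]
      · intro j hj
        rw [hstep]
        simp only
        rw [h4 j hj]
        have d1 : (arr.take (k+1)).drop l.toNat = [] :=
          List.drop_eq_nil_of_le (by simp [List.length_take]; omega)
        have d2 : (arr.take k).drop l.toNat = [] :=
          List.drop_eq_nil_of_le (by simp [List.length_take]; omega)
        rw [d1, d2]
    · -- right branch
      have hkl : l.toNat ≤ k := by omega
      have hstep : pvFoldA arr N l (k + 1) =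
          ((pvFoldA arr N l k).1, (pvFoldA arr N l k).2.set (arr[k]).toNat
            ((pvFoldA arr N l k).2.getD (arr[k]).toNat 0 + 1)) := by
        rw [hfold, pvStepA, if_neg hbl, hgetk, PySem.List.pySetD_of_nonneg _ _ hc0,
          PySem.List.pyGetD_of_nonneg _ _ hc0]
      refine ⟨by simp [hstep, h1], by simp [hstep, h2], ?_, ?_⟩
      · intro j hj
        rw [hstep]
        simp only
        rw [h3 j hj]
        have : min (k+1) l.toNat = min k l.toNat := by omega
        rw [this]
      · intro j hj
        rw [hstep]
        simp only
        rw [pvGetD_set, h2]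
        have hdrop : (arr.take (k+1)).drop l.toNat = (arr.take k).drop l.toNat ++ [arr[k]] := by
          rw [htake, List.drop_append]
          have : l.toNat - (arr.take k).length = 0 := by simp [List.length_take]; omega
          rw [this]
          simp
        rw [hdrop, List.count_append]
        by_cases he : (arr[k]).toNat = j
        · have hae : arr[k] = (j : Int) := by omega
          rw [if_pos ⟨he, by omega⟩, he, h4 j hj, hae]
          simp
        · have hae : ¬ (arr[k] = (j : Int)) := by omega
          rw [if_neg (by tauto), h4 j hj]
          simp [hae]

theorem pvFoldC_spec (L R : List Int) (M : Nat) (hL : L.length = M) (hR : R.length = M) :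
    ∀ k : Nat, k ≤ M →
      ((PySem.List.pyRange 0 (k : Int) 1).foldl pvStepC (L, R)).1.length = M ∧
      ((PySem.List.pyRange 0 (k : Int) 1).foldl pvStepC (L, R)).2.length = M ∧
      (∀ j : Nat, j < M →
        ((PySem.List.pyRange 0 (k : Int) 1).foldl pvStepC (L, R)).1.getD j 0 =
          if j < k then L.getD j 0 - min (L.getD j 0) (R.getD j 0) else L.getD j 0) ∧
      (∀ j : Nat, j < M →
        ((PySem.List.pyRange 0 (k : Int) 1).foldl pvStepC (L, R)).2.getD j 0 =
          if j < k then R.getD j 0 - min (L.getD j 0) (R.getD j 0) else R.getD j 0) := by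
  intro k
  induction k with
  | zero =>
    intro _
    simp [PySem.List.pyRange_one_eq_nil (le_refl (0:Int)), hL, hR]
  | succ k ih =>
    intro hk
    obtain ⟨h1, h2, h3, h4⟩ := ih (by omega)
    have hkc : ((k + 1 : Nat) : Int) = (k : Int) + 1 := by push_cast; ring
    set P := (PySem.List.pyRange 0 (k : Int) 1).foldl pvStepC (L, R) with hP
    have hfold : (PySem.List.pyRange 0 ((k + 1 : Nat) : Int) 1).foldl pvStepC (L, R) =
        pvStepC P (k : Int) := by
      rw [hkc, PySem.List.pyRange_one_succ_right (by positivity), List.foldl_append]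
      rfl
    have hg1 : PySem.List.pyGetD P.1 (k : Int) 0 = P.1.getD k 0 := PySem.List.pyGetD_natCast _ _ _
    have hg2 : PySem.List.pyGetD P.2 (k : Int) 0 = P.2.getD k 0 := PySem.List.pyGetD_natCast _ _ _
    have hs1 : PySem.List.pySetD P.1 (k : Int)
        (PySem.List.pyGetD P.1 (k : Int) 0 - min (PySem.List.pyGetD P.1 (k : Int) 0) (PySem.List.pyGetD P.2 (k : Int) 0)) =
        P.1.set k (P.1.getD k 0 - min (P.1.getD k 0) (P.2.getD k 0)) := by
      rw [hg1, hg2, PySem.List.pySetD_of_nonneg _ _ (by positivity)]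
      norm_num
    have hs2 : PySem.List.pySetD P.2 (k : Int)
        (PySem.List.pyGetD P.2 (k : Int) 0 - min (PySem.List.pyGetD P.1 (k : Int) 0) (PySem.List.pyGetD P.2 (k : Int) 0)) =
        P.2.set k (P.2.getD k 0 - min (P.1.getD k 0) (P.2.getD k 0)) := by
      rw [hg1, hg2, PySem.List.pySetD_of_nonneg _ _ (by positivity)]
      norm_num
    have hPk1 : P.1.getD k 0 = L.getD k 0 := by rw [h3 k (by omega)]; simp
    have hPk2 : P.2.getD k 0 = R.getD k 0 := by rw [h4 k (by omega)]; simp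
    rw [hfold, pvStepC]
    simp only [hs1, hs2]
    refine ⟨by simp [h1], by simp [h2], ?_, ?_⟩
    · intro j hj
      rw [pvGetD_set, h1, hPk1, hPk2]
      by_cases he : k = j
      · subst he; simp; omega
      · rw [if_neg (by tauto), h3 j hj]
        by_cases hlt : j < k
        · rw [if_pos hlt, if_pos (by omega)]
        · rw [if_neg hlt, if_neg (by omega)]
    · intro j hj
      rw [pvGetD_set, h2, hPk1, hPk2]
      by_cases he : k = j
      · subst he; simp; omega
      · rw [if_neg (by tauto), h4 j hj]
        by_cases hlt : j < k
        · rw [if_pos hlt, if_pos (by omega)]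
        · rw [if_neg hlt, if_neg (by omega)]

theorem pvFoldD_spec (L : List Int) (M : Nat) (F : Nat → Int) (t0 cnt0 : Int)
    (hL : L.length = M) (hF : ∀ j : Nat, j < M → L.getD j 0 = F j)
    (hFpos : ∀ j : Nat, 0 ≤ F j) (ht0 : 0 ≤ t0) :
    ∀ k : Nat, k ≤ M →
      ((PySem.List.pyRange 0 (k : Int) 1).foldl pvStepD (L, t0, cnt0)).1.length = M ∧
      (∀ j : Nat, j < M → k ≤ j →
        ((PySem.List.pyRange 0 (k : Int) 1).foldl pvStepD (L, t0, cnt0)).1.getD j 0 = F j) ∧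
      ((PySem.List.pyRange 0 (k : Int) 1).foldl pvStepD (L, t0, cnt0)).2.1 =
        t0 - min t0 (((List.range k).map (fun j => F j / 2)).sum) ∧
      ((PySem.List.pyRange 0 (k : Int) 1).foldl pvStepD (L, t0, cnt0)).2.2 =
        cnt0 - min t0 (((List.range k).map (fun j => F j / 2)).sum) := by
  intro k
  induction k with
  | zero =>
    intro _
    refine ⟨by simp [PySem.List.pyRange_one_eq_nil (le_refl (0:Int)), hL], ?_, ?_, ?_⟩ <;>
      simp [PySem.List.pyRange_one_eq_nil (le_refl (0:Int))]
    · intro j hj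
      have := hF j hj
      simpa [List.getD_eq_getElem?_getD] using this
    · omega
    · omega
  | succ k ih =>
    intro hk
    obtain ⟨h1, h2, h3, h4⟩ := ih (by omega)
    have hkc : ((k + 1 : Nat) : Int) = (k : Int) + 1 := by push_cast; ring
    set P := (PySem.List.pyRange 0 (k : Int) 1).foldl pvStepD (L, t0, cnt0) with hP
    have hfold : (PySem.List.pyRange 0 ((k + 1 : Nat) : Int) 1).foldl pvStepD (L, t0, cnt0) =
        pvStepD P (k : Int) := by
      rw [hkc, PySem.List.pyRange_one_succ_right (by positivity), List.foldl_append]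
      rfl
    have hSnn : 0 ≤ ((List.range k).map (fun j => F j / 2)).sum := by
      apply List.sum_nonneg
      intro x hx
      simp only [List.mem_map] at hx
      obtain ⟨j, _, rfl⟩ := hx
      exact Int.ediv_nonneg (hFpos j) (by norm_num)
    have hgk : PySem.List.pyGetD P.1 (k : Int) 0 = F k := by
      rw [PySem.List.pyGetD_natCast, h2 k (by omega) le_rfl]
    have hdr : pvDrain (PySem.List.pyGetD P.1 (k : Int) 0) P.2.1 P.2.2 =
        (F k - 2 * min P.2.1 (F k / 2), P.2.1 - min P.2.1 (F k / 2), P.2.2 - min P.2.1 (F k / 2)) := by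
      rw [hgk, pvDrain_spec _ _ _ (hFpos k) (by rw [h3]; omega)]
    have hsum : ((List.range (k+1)).map (fun j => F j / 2)).sum =
        ((List.range k).map (fun j => F j / 2)).sum + F k / 2 := by
      rw [List.range_succ, List.map_append, List.sum_append]
      simp
    have hq : 0 ≤ F k / 2 := Int.ediv_nonneg (hFpos k) (by norm_num)
    rw [hfold, pvStepD]
    simp only [hdr, PySem.List.pySetD_of_nonneg _ _ (by positivity : (0:Int) ≤ (k:Int))]
    refine ⟨by simp [h1], ?_, ?_, ?_⟩
    · intro j hj hjk
      have : (k : Int).toNat = k := by omega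
      rw [this, pvGetD_set, if_neg (by omega), h2 j hj (by omega)]
    · rw [h3, hsum]; omega
    · rw [h4, h3, hsum]; omega

def pvLeft (arr : List Int) (N : Nat) (l : Int) : List Int := (arr.take N).take l.toNat
def pvRight (arr : List Int) (N : Nat) (l : Int) : List Int := (arr.take N).drop l.toNat
def pvCntL (arr : List Int) (N : Nat) (l : Int) (c : Int) : Int := ((pvLeft arr N l).count c : Int)
def pvCntR (arr : List Int) (N : Nat) (l : Int) (c : Int) : Int := ((pvRight arr N l).count c : Int)
def pvRemL (arr : List Int) (N : Nat) (l : Int) (c : Int) : Int :=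
  pvCntL arr N l c - min (pvCntL arr N l c) (pvCntR arr N l c)
def pvRemR (arr : List Int) (N : Nat) (l : Int) (c : Int) : Int :=
  pvCntR arr N l c - min (pvCntL arr N l c) (pvCntR arr N l c)
def pvDelta (arr : List Int) (N : Nat) (l : Int) (c : Int) : Int :=
  pvCntL arr N l c - pvCntR arr N l c
def pvClosed (lp rp hl hr : Int) : Int :=
  if rp < lp then lp - min (PySem.Int.floordiv (lp - rp) 2) hl
  else if lp < rp then rp - min (PySem.Int.floordiv (rp - lp) 2) hr
  else lp

theorem pvRemL_nonneg (arr : List Int) (N : Nat) (l : Int) (c : Int) : 0 ≤ pvRemL arr N l c := by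
  simp [pvRemL, pvCntL, pvCntR]
theorem pvRemR_nonneg (arr : List Int) (N : Nat) (l : Int) (c : Int) : 0 ≤ pvRemR arr N l c := by
  simp [pvRemR, pvCntL, pvCntR]

theorem pvLr1_spec (arr : List Int) (N : Nat) (l : Int)
    (hlen : N ≤ arr.length) (hpre : ∀ x ∈ arr.take N, 0 ≤ x ∧ x ≤ (N : Int)) :
    ((PySem.List.pyRange 0 ((N + 1 : Nat) : Int) 1).foldl pvStepC (pvFoldA arr N l N)).1.length = N + 1 ∧
    ((PySem.List.pyRange 0 ((N + 1 : Nat) : Int) 1).foldl pvStepC (pvFoldA arr N l N)).2.length = N + 1 ∧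
    (∀ j : Nat, j ≤ N →
      ((PySem.List.pyRange 0 ((N + 1 : Nat) : Int) 1).foldl pvStepC (pvFoldA arr N l N)).1.getD j 0 =
        pvRemL arr N l (j : Int)) ∧
    (∀ j : Nat, j ≤ N →
      ((PySem.List.pyRange 0 ((N + 1 : Nat) : Int) 1).foldl pvStepC (pvFoldA arr N l N)).2.getD j 0 =
        pvRemR arr N l (j : Int)) := by
  obtain ⟨a1, a2, a3, a4⟩ := pvFoldA_spec arr N l hlen hpre N le_rfl
  obtain ⟨c1, c2, c3, c4⟩ := pvFoldC_spec (pvFoldA arr N l N).1 (pvFoldA arr N l N).2 (N + 1) a1 a2 (N + 1) le_rfl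
  have hleft : arr.take (min N l.toNat) = pvLeft arr N l := by
    rw [pvLeft, List.take_take, Nat.min_comm]
  refine ⟨c1, c2, ?_, ?_⟩
  · intro j hj
    rw [c3 j (by omega), if_pos (by omega), a3 j hj, a4 j hj]
    rw [pvRemL, pvCntL, pvCntR, hleft, pvRight]
  · intro j hj
    rw [c4 j (by omega), if_pos (by omega), a3 j hj, a4 j hj]
    rw [pvRemR, pvCntL, pvCntR, hleft, pvRight]

theorem pvPairs_spec (Q1 Q2 : List Int) (M : Nat) (F G : Nat → Int)
    (hF : ∀ j : Nat, j < M → Q1.getD j 0 = F j) (hG : ∀ j : Nat, j < M → Q2.getD j 0 = G j)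
    (hFn : ∀ j, 0 ≤ F j) (hGn : ∀ j, 0 ≤ G j) :
    (PySem.List.pyRange 0 (M : Int) 1).foldl (fun s i =>
      (if 0 < PySem.List.pyGetD Q1 i 0 then s.1 + PySem.List.pyGetD Q1 i 0 else s.1,
       if 0 < PySem.List.pyGetD Q2 i 0 then s.2 + PySem.List.pyGetD Q2 i 0 else s.2))
      ((0 : Int), (0 : Int))
    = (((List.range M).map F).sum, ((List.range M).map G).sum) := by
  have hget : ∀ i ∈ PySem.List.pyRange 0 (M : Int) 1,
      PySem.List.pyGetD Q1 i 0 = F i.toNat ∧ PySem.List.pyGetD Q2 i 0 = G i.toNat := by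
    intro i hi
    rw [PySem.List.mem_pyRange_one] at hi
    have hcast : i = ((i.toNat : Nat) : Int) := by omega
    constructor
    · rw [hcast, PySem.List.pyGetD_natCast, hF _ (by omega)]; congr 1
    · rw [hcast, PySem.List.pyGetD_natCast, hG _ (by omega)]; congr 1
  rw [PySem.List.foldl_congr_mem _ _ (fun s i =>
      (s.1 + PySem.List.pyGetD Q1 i 0, s.2 + PySem.List.pyGetD Q2 i 0)) _ ?_]
  · rw [PySem.List.foldl_prod_mk (f := fun s1 i => s1 + PySem.List.pyGetD Q1 i 0)
      (g := fun s2 i => s2 + PySem.List.pyGetD Q2 i 0), PySem.List.foldl_add, PySem.List.foldl_add]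
    have hm : ∀ (Q : List Int) (H : Nat → Int), (∀ j : Nat, j < M → Q.getD j 0 = H j) →
        ((PySem.List.pyRange 0 (M : Int) 1).map (fun i => PySem.List.pyGetD Q i 0)).sum =
          ((List.range M).map H).sum := by
      intro Q H hQ
      rw [PySem.List.pyRange_zero_natCast, List.map_map]
      congr 1
      apply List.map_congr_left
      intro k hk
      simp only [Function.comp]
      rw [PySem.List.pyGetD_natCast, hQ _ (List.mem_range.mp hk)]
    rw [hm Q1 F hF, hm Q2 G hG]
    simp
  · intro acc x hx
    obtain ⟨e1, e2⟩ := hget x hx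
    rw [e1, e2]
    have n1 := hFn x.toNat
    have n2 := hGn x.toNat
    rw [Prod.ext_iff]
    constructor <;> (dsimp only; split_ifs <;> omega)

-- sum over distinct colours = sum over the colour range, when f vanishes off the list
theorem pvSum_swap (s : List Int) (f : Int → Int) (M : Nat)
    (hmem : ∀ c ∈ s, 0 ≤ c ∧ c < (M : Int))
    (hz : ∀ j : Nat, j < M → ((j : Int) ∉ s) → f (j : Int) = 0) :
    ((PySem.Set.ofList s).map f).sum = ((List.range M).map (fun (j : Nat) => f (j : Int))).sum := by
  have hnd : (PySem.Set.ofList s).Nodup := PySem.Set.nodup_ofList s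
  rw [← List.sum_toFinset _ hnd]
  have hrange : ((List.range M).map (fun (j : Nat) => f (j : Int))).sum =
      ∑ j ∈ Finset.range M, f (j : Int) := by
    rw [← List.sum_toFinset _ List.nodup_range, List.toFinset_range]
  rw [hrange]
  have himg : ∑ j ∈ Finset.range M, f (j : Int) =
      ∑ x ∈ (Finset.range M).image (fun j : Nat => (j : Int)), f x := by
    rw [Finset.sum_image]
    intro x _ y _ h
    exact Nat.cast_inj.mp (by simpa using h)
  rw [himg]
  apply Finset.sum_subset
  · intro x hx
    rw [List.mem_toFinset, PySem.Set.mem_ofList] at hx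
    obtain ⟨h0, hM⟩ := hmem x hx
    simp only [Finset.mem_image, Finset.mem_range]
    exact ⟨x.toNat, by omega, by omega⟩
  · intro x hx hnotin
    simp only [Finset.mem_image, Finset.mem_range] at hx
    obtain ⟨j, hj, rfl⟩ := hx
    rw [List.mem_toFinset, PySem.Set.mem_ofList] at hnotin
    exact hz j hj hnotin

-- ===== B-side lemmas =====

theorem pvSumFilter (l : List Int) (p : Int → Bool) :
    (l.filter p).sum = (l.map (fun v => if p v then v else 0)).sum := by
  induction l with
  | nil => rfl
  | cons x t ih =>
    simp only [List.filter_cons, List.map_cons, List.sum_cons]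
    split_ifs <;> simp [ih, List.sum_cons]

theorem pvSumNeg (l : List Int) (f : Int → Int) :
    (l.map (fun x => -(f x))).sum = -((l.map f).sum) := by
  induction l with
  | nil => rfl
  | cons x t ih => simp only [List.map_cons, List.sum_cons, ih]; ring

-- the single signed-counter loop, read back per colour
theorem pvGetD_deltaFold (arr : List Int) (l : Int) (ps : List Int)
    (d : PySem.Dict Int Int) (c : Int) :
    (ps.foldl (pvStepDelta arr l) d).getD c 0 =
      d.getD c 0 + ((ps.filter (fun i => PySem.List.pyGetD arr i 0 == c)).map
        (fun i => if i < l then (1:Int) else -1)).sum := by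
  induction ps generalizing d with
  | nil => simp
  | cons i t ih =>
    simp only [List.foldl_cons]
    rw [ih]
    by_cases h : PySem.List.pyGetD arr i 0 = c
    · have hb : (PySem.List.pyGetD arr i 0 == c) = true := by simpa using h
      rw [List.filter_cons, if_pos hb, List.map_cons, List.sum_cons]
      simp only [pvStepDelta, PySem.Dict.getD_insert, h, if_pos trivial]
      ring
    · have hb : ¬ ((PySem.List.pyGetD arr i 0 == c) = true) := by simpa using h
      rw [List.filter_cons, if_neg hb]
      simp only [pvStepDelta, PySem.Dict.getD_insert]
      rw [if_neg (fun hc => h hc.symm)]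

theorem pvTakeEq (arr : List Int) (k : Nat) (hk : k ≤ arr.length) :
    (PySem.List.pyRange 0 (k : Int) 1).map (fun i => PySem.List.pyGetD arr i 0) = arr.take k := by
  have h1 : (PySem.List.pyRange 0 (k : Int) 1).map (fun i => PySem.List.pyGetD arr i 0) =
      (PySem.List.pyRange 0 (k : Int) 1).map (fun i => PySem.List.pyGetD (arr.take k) i 0) := by
    apply List.map_congr_left
    intro i hi
    rw [PySem.List.mem_pyRange_one] at hi
    have h0 : 0 ≤ i := by omega
    rw [PySem.List.pyGetD_of_nonneg _ _ h0, PySem.List.pyGetD_of_nonneg _ _ h0,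
      List.getD_eq_getElem?_getD, List.getD_eq_getElem?_getD,
      List.getElem?_eq_getElem (by omega : i.toNat < arr.length),
      List.getElem?_eq_getElem (by simp [List.length_take]; omega : i.toNat < (arr.take k).length)]
    simp [List.getElem_take]
  have hlen2 : (k : Int) = PySem.List.len (arr.take k) := by
    rw [PySem.List.len_eq]; simp [List.length_take]; omega
  rw [h1, hlen2, PySem.List.map_pyGetD_pyRange (arr.take k) 0 (by positivity), Int.toNat_zero,
    List.drop_zero]

theorem pvDropEq (arr : List Int) (N : Nat) (lN : Nat) (hlen : N ≤ arr.length) (hl : lN ≤ N) :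
    (PySem.List.pyRange (lN : Int) (N : Int) 1).map (fun i => PySem.List.pyGetD arr i 0) =
      (arr.take N).drop lN := by
  have h1 : (PySem.List.pyRange (lN : Int) (N : Int) 1).map (fun i => PySem.List.pyGetD arr i 0) =
      (PySem.List.pyRange (lN : Int) (N : Int) 1).map (fun i => PySem.List.pyGetD (arr.take N) i 0) := by
    apply List.map_congr_left
    intro i hi
    rw [PySem.List.mem_pyRange_one] at hi
    have h0 : 0 ≤ i := by omega
    rw [PySem.List.pyGetD_of_nonneg _ _ h0, PySem.List.pyGetD_of_nonneg _ _ h0,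
      List.getD_eq_getElem?_getD, List.getD_eq_getElem?_getD,
      List.getElem?_eq_getElem (by omega : i.toNat < arr.length),
      List.getElem?_eq_getElem (by simp [List.length_take]; omega : i.toNat < (arr.take N).length)]
    simp [List.getElem_take]
  have hlen2 : (N : Int) = PySem.List.len (arr.take N) := by
    rw [PySem.List.len_eq]; simp [List.length_take]; omega
  rw [h1, hlen2, PySem.List.map_pyGetD_pyRange (arr.take N) 0 (by positivity), Int.toNat_natCast]

-- per-colour value of the signed counter over the whole index range
theorem pvDeltaSum (arr : List Int) (N : Nat) (l : Int) (hlen : N ≤ arr.length) (c : Int) :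
    (((PySem.List.pyRange 0 (N : Int) 1).filter (fun i => PySem.List.pyGetD arr i 0 == c)).map
      (fun i => if i < l then (1:Int) else -1)).sum = pvDelta arr N l c := by
  set lN : Nat := min l.toNat N with hlN
  have hsplit : PySem.List.pyRange 0 (N : Int) 1 =
      PySem.List.pyRange 0 (lN : Int) 1 ++ PySem.List.pyRange (lN : Int) (N : Int) 1 :=
    PySem.List.pyRange_one_append 0 (lN : Int) (N : Int) (by positivity)
      (by exact_mod_cast Nat.min_le_right _ _)
  rw [hsplit, List.filter_append, List.map_append, List.sum_append]
  -- left part: constant weight 1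
  have hleftw : ((PySem.List.pyRange 0 (lN : Int) 1).filter
        (fun i => PySem.List.pyGetD arr i 0 == c)).map (fun i => if i < l then (1:Int) else -1) =
      ((PySem.List.pyRange 0 (lN : Int) 1).filter
        (fun i => PySem.List.pyGetD arr i 0 == c)).map (fun _ => (1:Int)) := by
    apply List.map_congr_left
    intro i hi
    have hi' := List.mem_of_mem_filter hi
    rw [PySem.List.mem_pyRange_one] at hi'
    rw [if_pos (by omega)]
  -- right part: constant weight -1
  have hrightw : ((PySem.List.pyRange (lN : Int) (N : Int) 1).filter
        (fun i => PySem.List.pyGetD arr i 0 == c)).map (fun i => if i < l then (1:Int) else -1) =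
      ((PySem.List.pyRange (lN : Int) (N : Int) 1).filter
        (fun i => PySem.List.pyGetD arr i 0 == c)).map (fun _ => (-1:Int)) := by
    apply List.map_congr_left
    intro i hi
    have hi' := List.mem_of_mem_filter hi
    rw [PySem.List.mem_pyRange_one] at hi'
    rw [if_neg (by omega)]
  rw [hleftw, hrightw, PySem.List.sum_map_const_int, PySem.List.sum_map_const_int]
  have hcl : ((PySem.List.pyRange 0 (lN : Int) 1).filter
      (fun i => PySem.List.pyGetD arr i 0 == c)).length = (pvLeft arr N l).count c := by
    rw [← List.countP_eq_length_filter]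
    have h2 : List.countP (fun x => x == c)
        (((PySem.List.pyRange 0 (lN : Int) 1)).map (fun i => PySem.List.pyGetD arr i 0)) =
        List.countP (fun i => PySem.List.pyGetD arr i 0 == c) (PySem.List.pyRange 0 (lN : Int) 1) := by
      rw [List.countP_map]; rfl
    rw [← h2, pvTakeEq arr lN (by omega), pvLeft, List.take_take, ← hlN, List.count]
  have hcr : ((PySem.List.pyRange (lN : Int) (N : Int) 1).filter
      (fun i => PySem.List.pyGetD arr i 0 == c)).length = (pvRight arr N l).count c := by
    rw [← List.countP_eq_length_filter]
    have h2 : List.countP (fun x => x == c)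
        (((PySem.List.pyRange (lN : Int) (N : Int) 1)).map (fun i => PySem.List.pyGetD arr i 0)) =
        List.countP (fun i => PySem.List.pyGetD arr i 0 == c) (PySem.List.pyRange (lN : Int) (N : Int) 1) := by
      rw [List.countP_map]; rfl
    have hdd : (arr.take N).drop lN = (arr.take N).drop l.toNat := by
      rcases Nat.le_total l.toNat N with h | h
      · rw [hlN, Nat.min_eq_left h]
      · rw [List.drop_eq_nil_of_le (by simp [List.length_take]; omega),
          List.drop_eq_nil_of_le (by simp [List.length_take]; omega)]
    rw [← h2, pvDropEq arr N lN hlen (by omega), hdd, pvRight, List.count]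
  rw [hcl, hcr, pvDelta, pvCntL, pvCntR]
  ring

theorem pvRemL_delta (arr : List Int) (N : Nat) (l : Int) (c : Int) :
    pvRemL arr N l c = if 0 < pvDelta arr N l c then pvDelta arr N l c else 0 := by
  simp only [pvRemL, pvDelta]
  split_ifs <;> omega

theorem pvRemR_delta (arr : List Int) (N : Nat) (l : Int) (c : Int) :
    pvRemR arr N l c = if pvDelta arr N l c < 0 then -(pvDelta arr N l c) else 0 := by
  simp only [pvRemR, pvDelta]
  split_ifs <;> omega

theorem pvCnt_zero_of_not_mem (arr : List Int) (N : Nat) (l : Int) (c : Int)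
    (h : c ∉ arr.take N) : pvCntL arr N l c = 0 ∧ pvCntR arr N l c = 0 := by
  have h1 : c ∉ pvLeft arr N l := fun hm => h (List.take_subset _ _ hm)
  have h2 : c ∉ pvRight arr N l := fun hm => h (List.drop_subset _ _ hm)
  constructor
  · rw [pvCntL, List.count_eq_zero.mpr h1]; rfl
  · rw [pvCntR, List.count_eq_zero.mpr h2]; rfl

def pvLpS (arr : List Int) (N : Nat) (l : Int) : Int :=
  ((List.range (N + 1)).map (fun (j : Nat) => pvRemL arr N l (j : Int))).sum
def pvRpS (arr : List Int) (N : Nat) (l : Int) : Int :=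
  ((List.range (N + 1)).map (fun (j : Nat) => pvRemR arr N l (j : Int))).sum
def pvHlS (arr : List Int) (N : Nat) (l : Int) : Int :=
  ((List.range (N + 1)).map (fun (j : Nat) => pvRemL arr N l (j : Int) / 2)).sum
def pvHrS (arr : List Int) (N : Nat) (l : Int) : Int :=
  ((List.range (N + 1)).map (fun (j : Nat) => pvRemR arr N l (j : Int) / 2)).sum
def pvOddL (arr : List Int) (N : Nat) (l : Int) : Int :=
  ((List.range (N + 1)).map (fun (j : Nat) => pvRemL arr N l (j : Int) % 2)).sum
def pvOddR (arr : List Int) (N : Nat) (l : Int) : Int :=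
  ((List.range (N + 1)).map (fun (j : Nat) => pvRemR arr N l (j : Int) % 2)).sum

theorem pvFuncA_closed (a arr : List Int) (N : Nat) (l : Int)
    (hN : PySem.List.pyGetD a 0 0 = (N : Int)) (hl : PySem.List.pyGetD a 1 0 = l)
    (hlen : N ≤ arr.length) (hpre : ∀ x ∈ arr.take N, 0 ≤ x ∧ x ≤ (N : Int)) :
    func a arr = pvClosed (pvLpS arr N l) (pvRpS arr N l) (pvHlS arr N l) (pvHrS arr N l) := by
  simp only [func]
  rw [hN, hl]
  have hto : ((N : Int) + 1).toNat = N + 1 := by omega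
  have hcast1 : ((N : Int) + 1) = ((N + 1 : Nat) : Int) := by push_cast; ring
  rw [hto, hcast1]
  have hfillE : (PySem.List.pyRange 0 ((N : Int)) 1).foldl (pvStepA arr l)
      (List.replicate (N + 1) 0, List.replicate (N + 1) 0) = pvFoldA arr N l N := rfl
  rw [hfillE]
  obtain ⟨q1, q2, q3, q4⟩ := pvLr1_spec arr N l hlen hpre
  set Q := (PySem.List.pyRange 0 ((N + 1 : Nat) : Int) 1).foldl pvStepC (pvFoldA arr N l N) with hQ
  have hPP : pvStepP Q.1 Q.2 = (fun (s : Int × Int) (i : Int) =>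
      (if 0 < PySem.List.pyGetD Q.1 i 0 then s.1 + PySem.List.pyGetD Q.1 i 0 else s.1,
       if 0 < PySem.List.pyGetD Q.2 i 0 then s.2 + PySem.List.pyGetD Q.2 i 0 else s.2)) := rfl
  rw [hPP, pvPairs_spec Q.1 Q.2 (N + 1)
      (fun j => pvRemL arr N l (j : Int)) (fun j => pvRemR arr N l (j : Int))
      (fun j hj => q3 j (by omega)) (fun j hj => q4 j (by omega))
      (fun j => pvRemL_nonneg arr N l _) (fun j => pvRemR_nonneg arr N l _)]
  dsimp only
  rw [show ((List.range (N + 1)).map (fun (j : Nat) => pvRemL arr N l (j : Int))).sum = pvLpS arr N l from rfl,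
    show ((List.range (N + 1)).map (fun (j : Nat) => pvRemR arr N l (j : Int))).sum = pvRpS arr N l from rfl]
  split_ifs with h1 h2
  · -- r_pair < l_pair
    have ht0 : 0 ≤ PySem.Int.floordiv (pvLpS arr N l - pvRpS arr N l) 2 := by
      rw [PySem.Int.floordiv_eq_ediv_of_pos (by norm_num)]
      refine Int.ediv_nonneg (by omega) (by norm_num)
    obtain ⟨d1, d2, d3, d4⟩ := pvFoldD_spec Q.1 (N + 1) (fun j => pvRemL arr N l (j : Int))
      (PySem.Int.floordiv (pvLpS arr N l - pvRpS arr N l) 2)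
      (|pvLpS arr N l - pvRpS arr N l| + pvRpS arr N l)
      q1 (fun j hj => q3 j (by omega)) (fun j => pvRemL_nonneg arr N l _) ht0 (N + 1) le_rfl
    rw [pvClosed, if_pos h1]
    rw [d4]
    have habs : |pvLpS arr N l - pvRpS arr N l| = pvLpS arr N l - pvRpS arr N l := by
      rw [abs_of_pos (show (0:Int) < pvLpS arr N l - pvRpS arr N l by omega)]
    rw [habs,
      show ((List.range (N + 1)).map (fun (j : Nat) => pvRemL arr N l (j : Int) / 2)).sum = pvHlS arr N l from rfl]
    ring_nf
  · -- l_pair < r_pair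
    have ht0 : 0 ≤ PySem.Int.floordiv (pvRpS arr N l - pvLpS arr N l) 2 := by
      rw [PySem.Int.floordiv_eq_ediv_of_pos (by norm_num)]
      refine Int.ediv_nonneg (by omega) (by norm_num)
    obtain ⟨d1, d2, d3, d4⟩ := pvFoldD_spec Q.2 (N + 1) (fun j => pvRemR arr N l (j : Int))
      (PySem.Int.floordiv (pvRpS arr N l - pvLpS arr N l) 2)
      (|pvLpS arr N l - pvRpS arr N l| + pvLpS arr N l)
      q2 (fun j hj => q4 j (by omega)) (fun j => pvRemR_nonneg arr N l _) ht0 (N + 1) le_rfl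
    rw [pvClosed, if_neg h1, if_pos h2]
    rw [d4]
    have habs : |pvLpS arr N l - pvRpS arr N l| = pvRpS arr N l - pvLpS arr N l := by
      rw [abs_of_neg (show pvLpS arr N l - pvRpS arr N l < 0 by omega)]
      ring
    rw [habs,
      show ((List.range (N + 1)).map (fun (j : Nat) => pvRemR arr N l (j : Int) / 2)).sum = pvHrS arr N l from rfl]
    ring_nf
  · rw [pvClosed, if_neg h1, if_neg h2]

-- parity bookkeeping
theorem pvSplitSum (N : Nat) (F : Nat → Int) (hFn : ∀ j, 0 ≤ F j) :
    ((List.range (N + 1)).map F).sum =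
      2 * ((List.range (N + 1)).map (fun j => F j / 2)).sum +
        ((List.range (N + 1)).map (fun j => F j % 2)).sum := by
  have h1 : (List.range (N + 1)).map F =
      (List.range (N + 1)).map (fun j => 2 * (F j / 2) + F j % 2) := by
    apply List.map_congr_left
    intro j _
    omega
  rw [h1, PySem.List.sum_map_add_int, List.sum_map_mul_left]

theorem pvSum_nonneg_terms (N : Nat) (F : Nat → Int) (hFn : ∀ j, 0 ≤ F j) :
    0 ≤ ((List.range (N + 1)).map F).sum := by
  apply List.sum_nonneg
  intro x hx
  simp only [List.mem_map] at hx
  obtain ⟨j, _, rfl⟩ := hx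
  exact hFn j

-- the closed form B computes, from the quantities A's closed form uses
theorem pvFinal (lp rp hl hr oL oR : Int)
    (hlp : 0 ≤ lp) (hrp : 0 ≤ rp) (hhl : 0 ≤ hl) (hhr : 0 ≤ hr)
    (e1 : lp = 2 * hl + oL) (e2 : rp = 2 * hr + oR) :
    pvClosed lp rp hl hr =
      max (PySem.Int.floordiv (lp + rp + 1) 2)
        (PySem.Int.floordiv (max lp rp + (if rp ≤ lp then oL else oR)) 2) := by
  simp only [pvClosed, PySem.Int.floordiv_eq_ediv_of_pos (show (0:Int) < 2 by norm_num),
    min_def, max_def]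
  split_ifs <;> omega

theorem pvFuncB_closed (a arr : List Int) (N : Nat) (l : Int)
    (hN : PySem.List.pyGetD a 0 0 = (N : Int)) (hl : PySem.List.pyGetD a 1 0 = l)
    (hlen : N ≤ arr.length) (hpre : ∀ x ∈ arr.take N, 0 ≤ x ∧ x ≤ (N : Int)) :
    func_alt a arr =
      max (PySem.Int.floordiv (pvLpS arr N l + pvRpS arr N l + 1) 2)
        (PySem.Int.floordiv (max (pvLpS arr N l) (pvRpS arr N l) +
          (if pvRpS arr N l ≤ pvLpS arr N l then pvOddL arr N l else pvOddR arr N l)) 2) := by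
  simp only [func_alt]
  rw [hN, hl]
  set delta := (PySem.List.pyRange 0 (N : Int) 1).foldl (pvStepDelta arr l) PySem.Dict.empty with hdelta
  have hnodup : delta.keys.Nodup := by
    rw [hdelta]
    exact PySem.Dict.nodup_keys_foldl_insert_key _ (fun i => PySem.List.pyGetD arr i 0)
      (fun d i => d.getD (PySem.List.pyGetD arr i 0) 0 + (if i < l then 1 else -1)) _
      PySem.Dict.nodup_keys_empty
  have hkeys : delta.keys = PySem.Set.ofList (arr.take N) := by
    rw [hdelta]
    refine (PySem.Dict.keys_foldl_insert_key (PySem.List.pyRange 0 (N : Int) 1)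
      (fun i => PySem.List.pyGetD arr i 0)
      (fun d i => d.getD (PySem.List.pyGetD arr i 0) 0 + (if i < l then 1 else -1))
      PySem.Dict.empty).trans ?_
    rw [pvTakeEq arr N hlen]
    rfl
  have hget : ∀ c : Int, delta.getD c 0 = pvDelta arr N l c := by
    intro c
    rw [hdelta, pvGetD_deltaFold, PySem.Dict.getD_empty, pvDeltaSum arr N l hlen c]
    ring
  have hvals : delta.values = (PySem.Set.ofList (arr.take N)).map (fun c => pvDelta arr N l c) := by
    rw [PySem.Dict.values_eq_map_keys delta hnodup 0, hkeys]
    apply List.map_congr_left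
    intro c _
    exact hget c
  have hmemb : ∀ c ∈ arr.take N, 0 ≤ c ∧ c < ((N + 1 : Nat) : Int) := by
    intro c hc
    have := hpre c hc
    push_cast
    omega
  -- lp
  have hlp : ((delta.values.filter (fun v => decide (0 < v))).sum) = pvLpS arr N l := by
    rw [pvSumFilter, hvals, List.map_map]
    have hcomp : ((fun v => if decide (0 < v) = true then v else 0) ∘ fun c => pvDelta arr N l c) =
        fun c => pvRemL arr N l c := by
      funext c
      simp only [Function.comp, decide_eq_true_eq, pvRemL_delta]
    rw [hcomp]
    rw [pvSum_swap (arr.take N) (fun c => pvRemL arr N l c) (N + 1) hmemb]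
    · rfl
    · intro j hj hnm
      obtain ⟨z1, z2⟩ := pvCnt_zero_of_not_mem arr N l (j : Int) hnm
      simp [pvRemL, z1, z2]
  -- rp
  have hrp : (-((delta.values.filter (fun v => decide (v < 0))).sum)) = pvRpS arr N l := by
    rw [pvSumFilter, hvals, List.map_map]
    have hcomp : ((fun v => if decide (v < 0) = true then v else 0) ∘ fun c => pvDelta arr N l c) =
        fun c => -(pvRemR arr N l c) := by
      funext c
      simp only [Function.comp, decide_eq_true_eq, pvRemR_delta]
      split_ifs <;> ring
    rw [hcomp, pvSumNeg]
    rw [pvSum_swap (arr.take N) (fun c => pvRemR arr N l c) (N + 1) hmemb]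
    · simp only [neg_neg]
      rfl
    · intro j hj hnm
      obtain ⟨z1, z2⟩ := pvCnt_zero_of_not_mem arr N l (j : Int) hnm
      simp [pvRemR, z1, z2]
  rw [hlp, hrp]
  -- odd
  congr 1
  congr 1
  by_cases hcase : pvRpS arr N l ≤ pvLpS arr N l
  · rw [if_pos hcase]
    have hq : (fun v : Int => (PySem.Int.mod v 2 != 0) &&
        (decide (0 < v) == decide (pvRpS arr N l ≤ pvLpS arr N l))) =
        (fun v : Int => (PySem.Int.mod v 2 != 0) && decide (0 < v)) := by
      funext v
      rw [decide_eq_true hcase]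
      cases decide (0 < v) <;> simp
    rw [hq]
    rw [← List.countP_eq_length_filter, hvals,
      List.countP_map]
    rw [show (((fun v : Int => (PySem.Int.mod v 2 != 0) && decide (0 < v)) ∘
        fun c => pvDelta arr N l c) : Int → Bool) =
      (fun c => (PySem.Int.mod (pvDelta arr N l c) 2 != 0) && decide (0 < pvDelta arr N l c)) from rfl]
    rw [← PySem.List.sum_map_ite_one_zero
      (fun c => (PySem.Int.mod (pvDelta arr N l c) 2 != 0) && decide (0 < pvDelta arr N l c))
      (PySem.Set.ofList (arr.take N))]
    have hind : ((PySem.Set.ofList (arr.take N)).map (fun c =>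
        if ((PySem.Int.mod (pvDelta arr N l c) 2 != 0) && decide (0 < pvDelta arr N l c)) = true
        then (1:Int) else 0)).sum =
        ((PySem.Set.ofList (arr.take N)).map (fun c => pvRemL arr N l c % 2)).sum := by
      apply congrArg
      apply List.map_congr_left
      intro c _
      rw [PySem.Int.mod_eq_emod_of_pos (by norm_num : (0:Int) < 2), pvRemL_delta]
      by_cases hpos : 0 < pvDelta arr N l c
      · rw [if_pos hpos]
        by_cases hodd : pvDelta arr N l c % 2 = 0
        · simp [hodd]
        · have h1 : pvDelta arr N l c % 2 = 1 := by omega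
          simp [h1, decide_eq_true hpos]
      · rw [if_neg hpos]
        simp [decide_eq_false hpos]
    rw [hind, pvSum_swap (arr.take N) (fun c => pvRemL arr N l c % 2) (N + 1) hmemb]
    · rfl
    · intro j hj hnm
      obtain ⟨z1, z2⟩ := pvCnt_zero_of_not_mem arr N l (j : Int) hnm
      simp [pvRemL, z1, z2]
  · rw [if_neg hcase]
    have hq : (fun v : Int => (PySem.Int.mod v 2 != 0) &&
        (decide (0 < v) == decide (pvRpS arr N l ≤ pvLpS arr N l))) =
        (fun v : Int => (PySem.Int.mod v 2 != 0) && !(decide (0 < v))) := by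
      funext v
      rw [decide_eq_false hcase]
      cases decide (0 < v) <;> simp
    rw [hq]
    rw [← List.countP_eq_length_filter, hvals, List.countP_map]
    rw [show (((fun v : Int => (PySem.Int.mod v 2 != 0) && !(decide (0 < v))) ∘
        fun c => pvDelta arr N l c) : Int → Bool) =
      (fun c => (PySem.Int.mod (pvDelta arr N l c) 2 != 0) && !(decide (0 < pvDelta arr N l c))) from rfl]
    rw [← PySem.List.sum_map_ite_one_zero
      (fun c => (PySem.Int.mod (pvDelta arr N l c) 2 != 0) && !(decide (0 < pvDelta arr N l c)))
      (PySem.Set.ofList (arr.take N))]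
    have hind : ((PySem.Set.ofList (arr.take N)).map (fun c =>
        if ((PySem.Int.mod (pvDelta arr N l c) 2 != 0) && !(decide (0 < pvDelta arr N l c))) = true
        then (1:Int) else 0)).sum =
        ((PySem.Set.ofList (arr.take N)).map (fun c => pvRemR arr N l c % 2)).sum := by
      apply congrArg
      apply List.map_congr_left
      intro c _
      rw [PySem.Int.mod_eq_emod_of_pos (by norm_num : (0:Int) < 2), pvRemR_delta]
      by_cases hneg : pvDelta arr N l c < 0
      · rw [if_pos hneg]
        have hpos : ¬ (0 < pvDelta arr N l c) := by omega
        by_cases hodd : pvDelta arr N l c % 2 = 0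
        · have : -pvDelta arr N l c % 2 = 0 := by omega
          simp [hodd, this]
        · have h1 : pvDelta arr N l c % 2 = 1 := by omega
          have h2 : -pvDelta arr N l c % 2 = 1 := by omega
          simp [h1, h2, decide_eq_false hpos]
      · rw [if_neg hneg]
        have : pvDelta arr N l c % 2 = 0 ∨ pvDelta arr N l c % 2 = 1 := by omega
        by_cases hodd : pvDelta arr N l c % 2 = 0
        · simp [hodd]
        · have h1 : pvDelta arr N l c % 2 = 1 := by omega
          have hpos : 0 < pvDelta arr N l c := by omega
          simp [h1, decide_eq_true hpos]
    rw [hind, pvSum_swap (arr.take N) (fun c => pvRemR arr N l c % 2) (N + 1) hmemb]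
    · rfl
    · intro j hj hnm
      obtain ⟨z1, z2⟩ := pvCnt_zero_of_not_mem arr N l (j : Int) hnm
      simp [pvRemR, z1, z2]

-- ===== VERDICT (by name: the statement is the Claim_ definition above) =====
theorem func_spec : Claim_equal_func := by
  intro a arr _hdom hpre
  obtain ⟨hlen3, hnlen, hvals⟩ := hpre
  unfold Spec_func
  by_cases hn : 0 ≤ PySem.List.pyGetD a 0 0
  · set l : Int := PySem.List.pyGetD a 1 0 with hldef
    set N : Nat := (PySem.List.pyGetD a 0 0).toNat with hNdef
    have hN : PySem.List.pyGetD a 0 0 = (N : Int) := by omega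
    have hlen : N ≤ arr.length := by omega
    have hpre' : ∀ x ∈ arr.take N, 0 ≤ x ∧ x ≤ (N : Int) := by
      intro x hx
      have := hvals x hx
      omega
    rw [pvFuncA_closed a arr N l hN rfl hlen hpre',
        pvFuncB_closed a arr N l hN rfl hlen hpre']
    exact pvFinal _ _ _ _ _ _
      (pvSum_nonneg_terms N _ (fun j => pvRemL_nonneg arr N l _))
      (pvSum_nonneg_terms N _ (fun j => pvRemR_nonneg arr N l _))
      (pvSum_nonneg_terms N _ (fun j => Int.ediv_nonneg (pvRemL_nonneg arr N l _) (by norm_num)))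
      (pvSum_nonneg_terms N _ (fun j => Int.ediv_nonneg (pvRemR_nonneg arr N l _) (by norm_num)))
      (by rw [pvLpS, pvHlS, pvOddL, pvSplitSum N _ (fun j => pvRemL_nonneg arr N l _)])
      (by rw [pvRpS, pvHrS, pvOddR, pvSplitSum N _ (fun j => pvRemR_nonneg arr N l _)])
  · have h1 : PySem.List.pyRange 0 (PySem.List.pyGetD a 0 0) 1 = [] :=
      PySem.List.pyRange_one_eq_nil (by omega)
    have h2 : PySem.List.pyRange 0 (PySem.List.pyGetD a 0 0 + 1) 1 = [] :=
      PySem.List.pyRange_one_eq_nil (by omega)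
    simp [func, func_alt, h1, h2, PySem.Dict.empty, PySem.Dict.values, PySem.Dict.items]
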